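-- pv_equiv track=rewrite | github.com/williamzhao23/stonehenge | stonehenge.py | create_ley_dl
-- ===== SOURCE A (Python) =====
-- from typing import List, Dict
--
-- def create_ley_dl(board_size: int) -> List[List[int]]:
--     """
--     Return ley_lines along the down-left diagonals given a board_size of
--     Stonehenge.
--
--     >>> create_ley_dl(1)
--     [[0], [1, 2]]
--     >>> create_ley_dl(4)
--     [[0, 2, 5, 9], [1, 3, 6, 10, 14], [4, 7, 11, 15], [8, 12, 16], [13, 17]]
--     """
--     # Generate first diagonal
--     ley_dl = [[0]]
--     start = 0
--     for n in range(2, board_size + 1):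
--         ley_dl[0].append(start + n)
--         start += n
--     # Generate heads of other diagonals
--     ley_dl.append([1])
--     start = 1
--     for n in range(3, board_size + 2):
--         ley_dl.append([start + n])
--         start += n
--     # Fill in other diagonals
--     for n in range(1, board_size):
--         start = ley_dl[n][0]
--         for i in range(n + 1, board_size + 1):
--             ley_dl[n].append(start + i)
--             start += i
--         ley_dl[n].append(start + board_size)
--     ley_dl[-1].append(ley_dl[-1][0] + board_size)
--     return ley_dl
-- ===== SOURCE B (Python) =====
-- def create_ley_dl(board_size):
--     # Number the triangular grid row by row: row i (i+2 cells for i < board_size,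
--     # then a final short row of board_size cells) starts at cell number starts[i].
--     # Down-left diagonal k is column k of every regular row that has one (rows
--     # i >= k-1), i.e. starts[i] + k, and the final row (shifted one column left)
--     # supplies its last cell.
--     starts = []
--     c = 0
--     for i in range(board_size):
--         starts.append(c)
--         c += i + 2
--     last = list(range(c, c + board_size))
--     diags = []
--     for k in range(board_size + 1):
--         d = [s + k for s in starts[max(k - 1, 0):]]
--         if k >= 1:
--             d.append(last[k - 1])
--         diags.append(d)
--     return diags
-- ===== Notes on version B (the rewrite author's own statement) =====
-- stated objective: simpler
-- what changed: B computes the triangular grid's row-start numbers once and reads each down-left diagonal directly off them (diagonal k = starts[i]+k for rows i >= k-1, plus the shifted final row's cell), replacing A's three interleaved running-sum loops with in-place list surgery.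
-- outside the precondition, e.g. on create_ley_dl(0): A returns [[0], [1, 1]], B returns [[]]; on create_ley_dl(-2): A returns [[0], [1, -1]], B returns []
import Mathlib
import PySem

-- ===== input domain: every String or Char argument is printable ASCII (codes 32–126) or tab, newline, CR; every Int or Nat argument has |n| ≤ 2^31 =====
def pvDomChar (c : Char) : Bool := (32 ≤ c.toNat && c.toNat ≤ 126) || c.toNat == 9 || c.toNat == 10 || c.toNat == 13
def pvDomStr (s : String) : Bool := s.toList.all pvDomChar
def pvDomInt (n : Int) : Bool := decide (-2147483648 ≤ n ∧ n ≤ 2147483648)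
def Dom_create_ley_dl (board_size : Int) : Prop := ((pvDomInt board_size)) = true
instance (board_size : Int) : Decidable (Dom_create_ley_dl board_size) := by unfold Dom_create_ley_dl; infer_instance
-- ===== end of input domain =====

-- B computes the grid's row-start cell numbers once and reads each down-left
-- diagonal directly off them (objective: simpler decomposition; same cost).

-- ===== PORT A =====
-- A builds the first diagonal by a running sum, then all diagonal heads by a
-- second running sum, then fills each diagonal in place by a third running sum,
-- finally appending the spill cell to the last diagonal.
def create_ley_dl (board_size : Int) : List (List Int) :=
  let p1 := (PySem.List.pyRange 2 (board_size + 1) 1).foldl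
      (fun (st : List Int × Int) n => (st.1 ++ [st.2 + n], st.2 + n)) ([0], 0)
  let p2 := (PySem.List.pyRange 3 (board_size + 2) 1).foldl
      (fun (st : List (List Int) × Int) n => (st.1 ++ [[st.2 + n]], st.2 + n))
      ([p1.1, [1]], 1)
  let p3 := (PySem.List.pyRange 1 board_size 1).foldl
      (fun (ld : List (List Int)) n =>
        let row := PySem.List.pyGetD ld n []
        let start := PySem.List.pyGetD row 0 (0 : Int)
        let inner := (PySem.List.pyRange (n + 1) (board_size + 1) 1).foldl
            (fun (st : List Int × Int) i => (st.1 ++ [st.2 + i], st.2 + i)) (row, start)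
        PySem.List.pySetD ld n (inner.1 ++ [inner.2 + board_size])) p2.1
  let lastRow := PySem.List.pyGetD p3 (-1) []
  PySem.List.pySetD p3 (-1)
    (lastRow ++ [PySem.List.pyGetD lastRow 0 (0 : Int) + board_size])

-- ===== PORT B =====
def create_ley_dl_alt (board_size : Int) : List (List Int) :=
  let st := (PySem.List.pyRange 0 board_size 1).foldl
      (fun (p : List Int × Int) i => (p.1 ++ [p.2], p.2 + i + 2)) ([], 0)
  let last := PySem.List.pyRange st.2 (st.2 + board_size) 1
  (PySem.List.pyRange 0 (board_size + 1) 1).map (fun k =>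
    let d := (PySem.List.slice st.1 (some (max (k - 1) 0)) none).map (fun s => s + k)
    if 1 ≤ k then d ++ [PySem.List.pyGetD last (k - 1) (0 : Int)] else d)

-- ===== PRECONDITION & SPEC =====
-- Pre_ restricts to the natural domain of the task: a Stonehenge board has at
-- least one row.  A also returns on board_size <= 0, but that corner is a
-- degenerate non-board; B's grid construction naturally yields no rows there.
def Pre_create_ley_dl (board_size : Int) : Prop := 1 ≤ board_size
instance (board_size : Int) : Decidable (Pre_create_ley_dl board_size) := by unfold Pre_create_ley_dl; infer_instance
def pvWitness_create_ley_dl : Int := 3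
def Spec_create_ley_dl (board_size : Int) (out : List (List Int)) : Prop := out = create_ley_dl_alt board_size
instance (board_size : Int) (out : List (List Int)) : Decidable (Spec_create_ley_dl board_size out) := by unfold Spec_create_ley_dl; infer_instance

-- ===== CLAIM (what is proved, stated in full; the proofs are below) =====
def Claim_equal_create_ley_dl : Prop := ∀ (board_size : Int), Dom_create_ley_dl board_size → Pre_create_ley_dl board_size → Spec_create_ley_dl board_size (create_ley_dl board_size)

-- ===== LEMMAS AND PROOFS =====

-- the common closed form: T i numbers the first cell of grid row i
def pvT : Nat → Int
  | 0 => 0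
  | (i+1) => pvT i + (i + 2)

lemma pvSetD_neg_one_append {α : Type} (xs : List α) (x v : α) :
    PySem.List.pySetD (xs ++ [x]) (-1) v = xs ++ [v] := by
  simp [PySem.List.pySetD, PySem.List.pySet?, PySem.List.pyIdx?]

lemma pvGetD_neg_one_append {α : Type} (xs : List α) (x d : α) :
    PySem.List.pyGetD (xs ++ [x]) (-1) d = x :=
  PySem.List.pyGetD_neg_one_append_singleton xs x d

lemma pvSet_append_length {α : Type} (A B : List α) (v : α) :
    (A ++ B).set A.length v = A ++ B.set 0 v := by
  induction A with
  | nil => simp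
  | cons a l ih => simp [List.set_cons_succ, ih]

-- the running-sum loop of A: appending 'start + n' for n in range(a, a+cnt)
lemma loopA (a cnt : Nat) (ha : 2 ≤ a) (c : Int) (l0 : List Int) :
    (PySem.List.pyRange (a:Int) ((a:Int)+(cnt:Int)) 1).foldl
      (fun (st : List Int × Int) n => (st.1 ++ [st.2 + n], st.2 + n)) (l0, pvT (a-2) + c)
    = (l0 ++ (List.range' (a-1) cnt).map (fun i => pvT i + c), pvT (a-2+cnt) + c) := by
  induction cnt with
  | zero => simp [PySem.List.pyRange_one_eq_nil]
  | succ n ih =>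
    have h1 : ((a:Int)+((n+1:Nat):Int)) = ((a:Int)+(n:Int)) + 1 := by push_cast; ring
    rw [h1, PySem.List.pyRange_one_succ_right (by omega), List.foldl_append, ih]
    simp only [List.foldl_cons, List.foldl_nil, List.range'_1_concat, List.map_append,
      List.map_cons, List.map_nil, Prod.mk.injEq]
    have h2 : pvT (a-2+n) + ((a:Int)+(n:Int)) = pvT (a-2+(n+1)) := by
      have : a-2+(n+1) = (a-2+n)+1 := by omega
      rw [this, pvT]
      generalize pvT (a-2+n) = P
      omega
    constructor
    · rw [List.append_assoc]
      congr 2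
      simp only [List.cons.injEq, and_true]
      rw [show a-1+n = a-2+(n+1) by omega, ← h2]
      ring_nf
    · rw [← h2]; ring_nf

-- the heads loop of A
lemma loopH (cnt : Nat) (l0 : List (List Int)) :
    (PySem.List.pyRange 3 (3+(cnt:Int)) 1).foldl
      (fun (st : List (List Int) × Int) n => (st.1 ++ [[st.2 + n]], st.2 + n)) (l0, 1)
    = (l0 ++ (List.range' 1 cnt).map (fun j => [pvT j + ((j:Int)+1)]), pvT cnt + ((cnt:Int)+1)) := by
  induction cnt with
  | zero => simp [PySem.List.pyRange_one_eq_nil, pvT]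
  | succ n ih =>
    have h1 : ((3:Int)+((n+1:Nat):Int)) = ((3:Int)+(n:Int)) + 1 := by push_cast; ring
    rw [h1, PySem.List.pyRange_one_succ_right (by omega), List.foldl_append, ih]
    simp only [List.foldl_cons, List.foldl_nil, List.range'_1_concat, List.map_append,
      List.map_cons, List.map_nil, Prod.mk.injEq]
    have h2 : pvT n + ((n:Int)+1) + ((3:Int)+(n:Int)) = pvT (n+1) + (((n+1:Nat):Int))+1 := by
      rw [pvT]; push_cast; ring
    refine ⟨?_, ?_⟩
    · rw [List.append_assoc]
      congr 3
      · rw [h2]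
        push_cast
        ring_nf
    · rw [h2]; push_cast; ring

def pvHead (k : Nat) : List Int := [pvT k + ((k:Int)+1)]
def pvDiag (m k : Nat) : List Int :=
  (List.range' k (m-k)).map (fun i => pvT i + ((k:Int)+1)) ++ [pvT m + (k:Int)]

lemma pvT_last (m : Nat) (hm : 1 ≤ m) : pvT (m-1) + (m:Int) + 1 = pvT m := by
  have h : m = (m-1)+1 := by omega
  rw [h, pvT, show (m-1)+1-1 = m-1 from by omega]
  generalize pvT (m-1) = P
  omega

-- the fill loop of A, one step at a time
lemma loop3 (m : Nat) (hm : 1 ≤ m) (t : Nat) (ht : t ≤ m - 1) :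
    (PySem.List.pyRange 1 (1+(t:Int)) 1).foldl
      (fun (ld : List (List Int)) n =>
        let row := PySem.List.pyGetD ld n []
        let start := PySem.List.pyGetD row 0 (0 : Int)
        let inner := (PySem.List.pyRange (n + 1) ((m:Int) + 1) 1).foldl
            (fun (st : List Int × Int) i => (st.1 ++ [st.2 + i], st.2 + i)) (row, start)
        PySem.List.pySetD ld n (inner.1 ++ [inner.2 + (m:Int)]))
      ((List.range m).map pvT :: (List.range m).map pvHead)
    = (List.range m).map pvT ::
        ((List.range t).map (pvDiag m) ++ (List.range' t (m-t)).map pvHead) := by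
  induction t with
  | zero => simp [PySem.List.pyRange_one_eq_nil, List.range_eq_range']
  | succ t ih =>
    have ht' : t ≤ m - 1 := by omega
    have h1 : (1:Int)+((t+1:Nat):Int) = (1+(t:Int)) + 1 := by push_cast; ring
    rw [h1, PySem.List.pyRange_one_succ_right (by omega), List.foldl_append,
      ih ht']
    simp only [List.foldl_cons, List.foldl_nil]
    -- the processed index
    have hidx : (1:Int)+(t:Int) = ((t+1:Nat):Int) := by push_cast; ring
    -- row lookup
    have hBsplit : List.range' t (m-t) = t :: List.range' (t+1) (m-(t+1)) := by
      rw [show m-t = (m-(t+1))+1 from by omega, List.range'_succ]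
    have hrow : PySem.List.pyGetD
        ((List.range m).map pvT :: ((List.range t).map (pvDiag m) ++ (List.range' t (m-t)).map pvHead))
        ((1:Int)+(t:Int)) [] = pvHead t := by
      rw [hidx, PySem.List.pyGetD_natCast, List.getD_cons_succ,
        List.getD_append_right _ _ _ _ (by simp),
        hBsplit]
      simp
    rw [hrow]
    -- start value
    have hstart : PySem.List.pyGetD (pvHead t) 0 (0:Int) = pvT t + ((t:Int)+1) := by
      simp [pvHead, PySem.List.pyGetD_zero_cons]
    rw [hstart]
    -- the inner fill loop via loopA
    have hrng : (1:Int)+(t:Int)+1 = ((t+2:Nat):Int) := by push_cast; ring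
    have hrng2 : ((m:Int)+1) = ((t+2:Nat):Int) + ((m-t-1:Nat):Int) := by
      omega
    have hinner := loopA (t+2) (m-t-1) (by omega) ((t:Int)+1) (pvHead t)
    rw [show t+2-2 = t from by omega] at hinner
    rw [hrng, hrng2]
    unfold pvHead at hinner ⊢
    rw [hinner]
    simp only [show t+2-1 = t+1 from rfl, show t+(m-t-1) = m-1 from by omega]
    -- the appended spill cell
    have hspill : pvT (m-1) + ((t:Int)+1) + (m:Int) = pvT m + (t:Int) := by
      rw [← pvT_last m hm]; ring
    -- the new, finished row is pvDiag m t
    have hnew : ([pvT t + ((t:Int)+1)] ++ (List.range' (t+1) (m-t-1)).map (fun i => pvT i + ((t:Int)+1)))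
        ++ [pvT (m-1) + ((t:Int)+1) + (m:Int)] = pvDiag m t := by
      rw [hspill]
      unfold pvDiag
      rw [show m-t = (m-(t+1))+1 from by omega, List.range'_succ]
      simp [show m-(t+1) = m-t-1 from by omega]
    rw [hnew]
    -- writing it back into the list
    rw [hidx, PySem.List.pySetD_natCast, List.set_cons_succ]
    congr 1
    rw [hBsplit, List.map_cons]
    have hset := pvSet_append_length ((List.range t).map (pvDiag m))
        (([pvT t + ((t:Int)+1)]) :: (List.range' (t+1) (m-(t+1))).map (fun k => [pvT k + ((k:Int)+1)]))
        (pvDiag m t)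
    simp only [List.length_map, List.length_range] at hset
    rw [hset, List.set_cons_zero, List.range_succ, List.map_append]
    simp

def pvSpecLey (m : Nat) : List (List Int) :=
  (List.range m).map pvT ::
  (List.range m).map (fun k =>
    (List.range' k (m - k)).map (fun i => pvT i + ((k : Int) + 1)) ++ [pvT m + (k:Int)])

lemma H1 (m : Nat) (hm : 1 ≤ m) :
    (PySem.List.pyRange 2 ((m:Int) + 1) 1).foldl
      (fun (st : List Int × Int) n => (st.1 ++ [st.2 + n], st.2 + n)) ([0], 0)
    = ((List.range m).map pvT, pvT (m-1)) := by
  have h1 := loopA 2 (m-1) (by omega) 0 [0]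
  norm_num [pvT] at h1
  rw [show ((m:Int)+1) = (2:Int) + ((m-1:Nat):Int) from by omega, h1]
  have hr : List.range m = 0 :: List.range' 1 (m-1) := by
    rw [List.range_eq_range', show m = (m-1)+1 from by omega, List.range'_succ]
    norm_num
  rw [hr]
  simp [pvT]

lemma H2 (m : Nat) (hm : 1 ≤ m) (d0 : List Int) :
    (PySem.List.pyRange 3 ((m:Int) + 2) 1).foldl
      (fun (st : List (List Int) × Int) n => (st.1 ++ [[st.2 + n]], st.2 + n)) ([d0, [1]], 1)
    = (d0 :: (List.range m).map pvHead, pvT (m-1) + ((((m-1:Nat)):Int) + 1)) := by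
  have h2 := loopH (m-1) [d0, [1]]
  norm_num [pvT] at h2
  rw [show ((m:Int)+2) = (3:Int) + ((m-1:Nat):Int) from by omega, h2]
  have hr : List.range m = 0 :: List.range' 1 (m-1) := by
    rw [List.range_eq_range', show m = (m-1)+1 from by omega, List.range'_succ]
    norm_num
  rw [hr]
  simp [pvHead, pvT]

lemma H3 (m : Nat) (hm : 1 ≤ m) :
    (PySem.List.pyRange 1 (m:Int) 1).foldl
      (fun (ld : List (List Int)) n =>
        let row := PySem.List.pyGetD ld n []
        let start := PySem.List.pyGetD row 0 (0 : Int)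
        let inner := (PySem.List.pyRange (n + 1) ((m:Int) + 1) 1).foldl
            (fun (st : List Int × Int) i => (st.1 ++ [st.2 + i], st.2 + i)) (row, start)
        PySem.List.pySetD ld n (inner.1 ++ [inner.2 + (m:Int)]))
      ((List.range m).map pvT :: (List.range m).map pvHead)
    = (List.range m).map pvT :: ((List.range (m-1)).map (pvDiag m) ++ [pvHead (m-1)]) := by
  have h3 := loop3 m hm (m-1) (le_refl _)
  rw [show (1:Int)+((m-1:Nat):Int) = (m:Int) from by omega,
    show m-(m-1) = 1 from by omega, List.range'_one] at h3
  simpa using h3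

theorem portA_eq (m : Nat) (hm : 1 ≤ m) : create_ley_dl (m : Int) = pvSpecLey m := by
  unfold create_ley_dl
  simp only
  rw [H1 m hm]
  rw [H2 m hm ((List.range m).map pvT)]
  rw [H3 m hm]
  rw [show (List.range m).map pvT :: ((List.range (m-1)).map (pvDiag m) ++ [pvHead (m-1)])
      = ((List.range m).map pvT :: (List.range (m-1)).map (pvDiag m)) ++ [pvHead (m-1)]
      from by simp]
  rw [pvGetD_neg_one_append, pvSetD_neg_one_append]
  have hval : PySem.List.pyGetD (pvHead (m-1)) 0 (0:Int) + (m:Int) = pvT m + ((m-1:Nat):Int) := by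
    simp [pvHead, PySem.List.pyGetD_zero_cons]
    rw [← pvT_last m hm]
    ring
  rw [hval]
  have hdiag : pvHead (m-1) ++ [pvT m + ((m-1:Nat):Int)] = pvDiag m (m-1) := by
    unfold pvHead pvDiag
    rw [show m-(m-1) = 1 from by omega, List.range'_one]
    simp
  rw [hdiag]
  have : (List.range (m-1)).map (pvDiag m) ++ [pvDiag m (m-1)] = (List.range m).map (pvDiag m) := by
    rw [show m = (m-1)+1 from by omega, List.range_succ]
    simp [show m-1+1-1 = m-1 from by omega]
  rw [List.cons_append, this]
  rfl

lemma pvRange_map (a : Int) (n : Nat) :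
    PySem.List.pyRange a (a + n) 1 = (List.range n).map (fun j : Nat => a + (j:Int)) := by
  have h : ((a + (n:Int)) - a).toNat = n := by omega
  rw [PySem.List.pyRange_one, h]

lemma startsB (cnt : Nat) :
    (PySem.List.pyRange 0 (cnt:Int) 1).foldl
      (fun (p : List Int × Int) i => (p.1 ++ [p.2], p.2 + i + 2)) ([], 0)
    = ((List.range cnt).map pvT, pvT cnt) := by
  induction cnt with
  | zero => simp [PySem.List.pyRange_one_eq_nil, pvT]
  | succ n ih =>
    have h1 : ((n+1 : Nat) : Int) = (n : Int) + 1 := by push_cast; ring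
    rw [h1, PySem.List.pyRange_one_succ_right (by omega), List.foldl_append, ih]
    simp only [List.foldl_cons, List.foldl_nil, List.range_succ, List.map_append,
      List.map_cons, List.map_nil, pvT, Prod.mk.injEq]
    exact ⟨trivial, by ring⟩

lemma pvDropRange (n i : Nat) : (List.range n).drop i = List.range' i (n-i) := by
  rw [List.range_eq_range', List.drop_range']
  norm_num

theorem portB_eq (m : Nat) (_hm : 1 ≤ m) : create_ley_dl_alt (m : Int) = pvSpecLey m := by
  unfold create_ley_dl_alt
  rw [startsB m]
  simp only
  have hlast : PySem.List.pyRange (pvT m) (pvT m + (m:Int)) 1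
      = (List.range m).map (fun j : Nat => pvT m + (j:Int)) := pvRange_map _ _
  have houter : ((m:Int) + 1) = ((m+1 : Nat) : Int) := by push_cast; ring
  rw [hlast, houter, PySem.List.pyRange_zero_natCast, List.map_map, List.range_succ_eq_map]
  simp only [List.map_cons, Function.comp_apply]
  unfold pvSpecLey
  congr 1
  · -- k = 0 diagonal
    rw [if_neg (by norm_num)]
    rw [show (((0:Nat):Int) - 1) = (-1 : Int) from by norm_num,
      show max (-1 : Int) 0 = (0:Int) from by norm_num]
    rw [show ((0:Int)) = (((0:Nat)):Int) from rfl, PySem.List.slice_from_natCast]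
    simp
  · -- diagonals 1..m
    rw [List.map_map]
    refine List.map_congr_left ?_
    intro k hk
    have hkm : k < m := List.mem_range.mp hk
    simp only [Function.comp_apply, Nat.succ_eq_add_one]
    rw [if_pos (by push_cast; omega)]
    have h1 : ((k+1 : Nat) : Int) - 1 = (k : Int) := by push_cast; ring
    rw [h1, show max ((k:Int)) 0 = ((k:Nat):Int) from by omega]
    rw [PySem.List.slice_from_natCast, PySem.List.pyGetD_natCast,
      PySem.List.getD_map_range _ _ _ _ hkm]
    rw [← List.map_drop, pvDropRange, List.map_map]
    congr 1

-- ===== VERDICT (by name: the statement is the Claim_ definition above) =====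
theorem create_ley_dl_spec : Claim_equal_create_ley_dl := by
  intro bs _ hpre
  unfold Spec_create_ley_dl
  have hpre' : (1:Int) ≤ bs := hpre
  have hbs : bs = (bs.toNat : Int) := (Int.toNat_of_nonneg (by omega)).symm
  have hm : 1 ≤ bs.toNat := by omega
  rw [hbs, portA_eq _ hm, portB_eq _ hm]
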